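-- pv_equiv track=rewrite | github.com/ebinezer-rajaram/model-merging | core/tasks/metrics.py | _find_first_label_match
-- ===== SOURCE A (Python) =====
-- from typing import Any, Dict, Iterable, Sequence
--
-- def _find_first_label_match(normalized_text: str, label_map: Dict[str, int]) -> int | None:
--     """Return the label index corresponding to the first occurrence in normalized_text."""
--     if not normalized_text:
--         return None
--
--     best_idx: int | None = None
--     best_pos: int | None = None
--     for name, idx in label_map.items():
--         if not name:
--             continue
--         pos = normalized_text.find(name)
--         if pos == -1:
--             continue
--         if best_pos is None or pos < best_pos:
--             best_pos = pos
--             best_idx = idx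
--     return best_idx
-- ===== SOURCE B (Python) =====
-- def _find_first_label_match(normalized_text, label_map):
--     """Position-major scan: walk the text left to right and return the index of
--     the first label (in dict order) whose name starts at the earliest matching
--     position."""
--     items = list(label_map.items())
--     for i in range(len(normalized_text)):
--         for name, idx in items:
--             if name and normalized_text.startswith(name, i):
--                 return idx
--     return None
-- ===== Notes on version B (the rewrite author's own statement) =====
-- stated objective: faster
-- what changed: A is pattern-major (one full-text str.find per label, keeping the first strict minimum position); B is position-major (walk the text left to right and return the first label, in dict order, whose name starts at the current position), so it stops at the earliest occurrence instead of scanning the whole text for every label.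
import Mathlib
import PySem

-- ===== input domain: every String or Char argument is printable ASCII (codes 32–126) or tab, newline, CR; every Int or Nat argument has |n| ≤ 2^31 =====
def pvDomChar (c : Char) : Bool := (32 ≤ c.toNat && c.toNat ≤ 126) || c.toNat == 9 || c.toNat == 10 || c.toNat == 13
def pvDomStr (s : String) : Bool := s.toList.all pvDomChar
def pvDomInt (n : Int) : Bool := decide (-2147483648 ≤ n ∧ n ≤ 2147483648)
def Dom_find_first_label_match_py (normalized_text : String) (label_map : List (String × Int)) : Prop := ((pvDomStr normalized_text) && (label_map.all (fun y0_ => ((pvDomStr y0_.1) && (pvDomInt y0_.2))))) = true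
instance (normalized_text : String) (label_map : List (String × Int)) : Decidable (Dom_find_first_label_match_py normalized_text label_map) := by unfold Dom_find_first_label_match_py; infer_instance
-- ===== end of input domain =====

-- ===== PORT A =====
-- B changes A's loop structure (position-major instead of pattern-major); proved to return the same label index.
-- A: iterate label_map.items(), str.find each name, keep the first strict minimum position.
-- Exact over List Char: PySem.Chars.find = str.find; dict iteration = (PySem.Dict.ofList label_map).items.
def pvFoldA (t : List Char) : List (List Char × Int) → Option Int × Option Int → Option Int
  | [], st => st.1
  | e :: rest, st =>
    if e.1 = [] then pvFoldA t rest st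
    else
      let pos := PySem.Chars.find t e.1
      if pos = -1 then pvFoldA t rest st
      else
        match st.2 with
        | none => pvFoldA t rest (some e.2, some pos)
        | some bp => if pos < bp then pvFoldA t rest (some e.2, some pos) else pvFoldA t rest st

def find_first_label_match_py (normalized_text : String) (label_map : List (String × Int)) : Option Int :=
  if normalized_text.toList = [] then none
  else
    pvFoldA normalized_text.toList
      (((PySem.Dict.ofList label_map).items).map (fun e => (e.1.toList, e.2))) (none, none)

-- shared B-side predicate: "this item's nonempty name starts at the current position"
def pvOk (s : List Char) (e : List Char × Int) : Bool :=
  (!e.1.isEmpty) && PySem.Chars.startswith s e.1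

-- ===== PORT B =====
-- B: walk the text left to right (suffix c :: rest = position i); at each position return the first
-- item (dict order) whose nonempty name starts there. text.startswith(name, i) with 0 ≤ i < len(text)
-- is exactly PySem.Chars.startswith applied to the suffix.
def pvScanB (items : List (List Char × Int)) : List Char → Option Int
  | [] => none
  | c :: rest =>
    match items.find? (pvOk (c :: rest)) with
    | some e => some e.2
    | none => pvScanB items rest

def find_first_label_match_py_alt (normalized_text : String) (label_map : List (String × Int)) : Option Int :=
  pvScanB (((PySem.Dict.ofList label_map).items).map (fun e => (e.1.toList, e.2)))
    normalized_text.toList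

-- ===== PRECONDITION & SPEC =====
def Spec_find_first_label_match_py (normalized_text : String) (label_map : List (String × Int)) (out : Option Int) : Prop := out = find_first_label_match_py_alt normalized_text label_map
instance (normalized_text : String) (label_map : List (String × Int)) (out : Option Int) : Decidable (Spec_find_first_label_match_py normalized_text label_map out) := by unfold Spec_find_first_label_match_py; infer_instance

-- ===== CLAIM (what is proved, stated in full; the proofs are below) =====
def Claim_equal_find_first_label_match_py : Prop := ∀ (normalized_text : String) (label_map : List (String × Int)), Dom_find_first_label_match_py normalized_text label_map → Spec_find_first_label_match_py normalized_text label_map (find_first_label_match_py normalized_text label_map)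

-- ===== LEMMAS AND PROOFS =====

-- positions (as find-results) of the valid entries A considers
def pvVals (t : List Char) (l : List (List Char × Int)) : List Int :=
  l.filterMap (fun e =>
    if e.1 ≠ [] ∧ PySem.Chars.find t e.1 ≠ -1 then some (PySem.Chars.find t e.1) else none)

lemma pvVals_cons (t : List Char) (e : List Char × Int) (l : List (List Char × Int)) :
    pvVals t (e :: l) =
      if e.1 ≠ [] ∧ PySem.Chars.find t e.1 ≠ -1 then PySem.Chars.find t e.1 :: pvVals t l
      else pvVals t l := by
  simp only [pvVals, List.filterMap_cons]
  split_ifs with h <;> simp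

lemma pvVals_nonneg (t : List Char) (l : List (List Char × Int)) :
    ∀ m ∈ pvVals t l, 0 ≤ m := by
  intro m hm
  simp only [pvVals, List.mem_filterMap] at hm
  obtain ⟨e, _, he⟩ := hm
  split_ifs at he with h
  cases he
  have := PySem.Chars.neg_one_le_find (s := t) (sub := e.1)
  omega

-- a find? with predicates agreeing on the members of the list
lemma pvFind?_congr {α : Type} (l : List α) (p q : α → Bool) (h : ∀ e ∈ l, p e = q e) :
    l.find? p = l.find? q := by
  induction l with
  | nil => rfl
  | cons x xs ih =>
    simp only [List.find?_cons, h x (by simp)]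
    split
    · rfl
    · exact ih (fun e he => h e (by simp [he]))

lemma pvMin?_cons (a m : Int) (l : List Int) (h : l.min? = some m) :
    (a :: l).min? = some (min a m) := by
  rw [List.min?_eq_some_iff]
  rw [List.min?_eq_some_iff] at h
  obtain ⟨hm, hle⟩ := h
  constructor
  · rcases le_total a m with hc | hc
    · simp [min_eq_left hc]
    · simp [min_eq_right hc, hm]
  · intro b hb
    rcases List.mem_cons.mp hb with rfl | hb
    · exact min_le_left _ _
    · exact le_trans (min_le_right _ _) (hle b hb)

lemma pvMin?_nonneg (t : List Char) (l : List (List Char × Int)) (m : Int)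
    (h : (pvVals t l).min? = some m) : 0 ≤ m :=
  pvVals_nonneg t l m (List.min?_mem h)

-- A's fold from a live best state (some bi, some bp)
lemma pvFoldA_some (t : List Char) (l : List (List Char × Int)) (bi bp : Int) :
    pvFoldA t l (some bi, some bp) =
      match (pvVals t l).min? with
      | none => some bi
      | some m =>
        if m < bp then
          (l.find? (fun e => (!e.1.isEmpty) && (PySem.Chars.find t e.1 == m))).map (·.2)
        else some bi := by
  induction l generalizing bi bp with
  | nil => rfl
  | cons e rest ih =>
    by_cases he : e.1 = []
    · rw [pvVals_cons]
      simp only [pvFoldA, he, ih, ne_eq, not_true_eq_false, false_and, if_false]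
      cases hm : (pvVals t rest).min? with
      | none => rfl
      | some m => simp [he]
    · by_cases hpos : PySem.Chars.find t e.1 = -1
      · rw [pvVals_cons]
        simp only [pvFoldA, hpos, ih, ne_eq, he, not_false_eq_true,
          true_and, not_true_eq_false, if_false]
        cases hm : (pvVals t rest).min? with
        | none => rfl
        | some m =>
          have hm0 : 0 ≤ m := pvMin?_nonneg t rest m hm
          have hx : (PySem.Chars.find t e.1 == m) = false := by
            rw [hpos]; simp; omega
          simp [hx]
      · -- valid head entry
        have hval : e.1 ≠ [] ∧ PySem.Chars.find t e.1 ≠ -1 := ⟨he, hpos⟩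
        have hp0 : 0 ≤ PySem.Chars.find t e.1 := by
          have := PySem.Chars.neg_one_le_find (s := t) (sub := e.1)
          omega
        rw [pvVals_cons, if_pos hval]
        have hEmp : e.1.isEmpty = false := by simpa using he
        by_cases hlt : PySem.Chars.find t e.1 < bp
        · simp only [pvFoldA, if_neg he, if_neg hpos, if_pos hlt]
          rw [ih]
          cases hm : (pvVals t rest).min? with
          | none =>
            have : pvVals t rest = [] := List.min?_eq_none_iff.mp hm
            simp only [this, List.min?_cons', List.foldl_nil, if_pos hlt,
              List.find?_cons, hEmp, Bool.not_false, beq_self_eq_true, Bool.and_self]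
            rfl
          | some m =>
            rw [pvMin?_cons _ _ _ hm]
            rcases lt_or_ge m (PySem.Chars.find t e.1) with hc | hc
            · have hmin : min (PySem.Chars.find t e.1) m = m := min_eq_right (le_of_lt hc)
              have hne' : (PySem.Chars.find t e.1 == m) = false := by simp; omega
              simp only [hmin, if_pos hc, if_pos (lt_trans hc hlt),
                List.find?_cons, hne', Bool.and_false]
            · have hmin : min (PySem.Chars.find t e.1) m = PySem.Chars.find t e.1 :=
                min_eq_left hc
              simp only [hmin, if_neg (not_lt.mpr hc), if_pos hlt,
                List.find?_cons, hEmp, Bool.not_false, beq_self_eq_true, Bool.and_self]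
              rfl
        · simp only [pvFoldA, if_neg he, if_neg hpos, if_neg hlt]
          rw [ih]
          cases hm : (pvVals t rest).min? with
          | none =>
            have : pvVals t rest = [] := List.min?_eq_none_iff.mp hm
            simp only [this, List.min?_cons', List.foldl_nil, if_neg hlt]
          | some m =>
            rw [pvMin?_cons _ _ _ hm]
            rcases lt_or_ge m bp with hc | hc
            · have hcm : m < PySem.Chars.find t e.1 := by omega
              have hmin : min (PySem.Chars.find t e.1) m = m := min_eq_right (le_of_lt hcm)
              have hne' : (PySem.Chars.find t e.1 == m) = false := by simp; omega
              simp only [hmin, if_pos hc, List.find?_cons, hne', Bool.and_false]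
            · have hmin : ¬ min (PySem.Chars.find t e.1) m < bp := by
                have h1 : bp ≤ PySem.Chars.find t e.1 := not_lt.mp hlt
                exact not_lt.mpr (le_min h1 hc)
              simp only [if_neg (not_lt.mpr hc), if_neg hmin]

-- A's fold from the initial state
lemma pvFoldA_init (t : List Char) (l : List (List Char × Int)) :
    pvFoldA t l (none, none) =
      match (pvVals t l).min? with
      | none => none
      | some m =>
        (l.find? (fun e => (!e.1.isEmpty) && (PySem.Chars.find t e.1 == m))).map (·.2) := by
  induction l with
  | nil => rfl
  | cons e rest ih =>
    by_cases he : e.1 = []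
    · rw [pvVals_cons]
      simp only [pvFoldA, he, ih, ne_eq, not_true_eq_false, false_and, if_false]
      cases hm : (pvVals t rest).min? with
      | none => rfl
      | some m => simp [he]
    · by_cases hpos : PySem.Chars.find t e.1 = -1
      · rw [pvVals_cons]
        simp only [pvFoldA, hpos, ih, ne_eq, he, not_false_eq_true,
          true_and, not_true_eq_false, if_false]
        cases hm : (pvVals t rest).min? with
        | none => rfl
        | some m =>
          have hm0 : 0 ≤ m := pvMin?_nonneg t rest m hm
          have hx : (PySem.Chars.find t e.1 == m) = false := by
            rw [hpos]; simp; omega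
          simp [hx]
      · have hval : e.1 ≠ [] ∧ PySem.Chars.find t e.1 ≠ -1 := ⟨he, hpos⟩
        have hp0 : 0 ≤ PySem.Chars.find t e.1 := by
          have := PySem.Chars.neg_one_le_find (s := t) (sub := e.1)
          omega
        have hEmp : e.1.isEmpty = false := by simpa using he
        rw [pvVals_cons, if_pos hval]
        simp only [pvFoldA, if_neg he, if_neg hpos]
        rw [pvFoldA_some]
        cases hm : (pvVals t rest).min? with
        | none =>
          have : pvVals t rest = [] := List.min?_eq_none_iff.mp hm
          simp only [this, List.min?_cons', List.foldl_nil,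
            List.find?_cons, hEmp, Bool.not_false, beq_self_eq_true, Bool.and_self]
          rfl
        | some m =>
          rw [pvMin?_cons _ _ _ hm]
          rcases lt_or_ge m (PySem.Chars.find t e.1) with hc | hc
          · have hmin : min (PySem.Chars.find t e.1) m = m := min_eq_right (le_of_lt hc)
            have hne' : (PySem.Chars.find t e.1 == m) = false := by simp; omega
            simp only [hmin, if_pos hc, List.find?_cons, hne', Bool.and_false]
          · have hmin : min (PySem.Chars.find t e.1) m = PySem.Chars.find t e.1 :=
              min_eq_left hc
            simp only [hmin, if_neg (not_lt.mpr hc),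
              List.find?_cons, hEmp, Bool.not_false, beq_self_eq_true, Bool.and_self]
            rfl

-- B's scan when no position matches
lemma pvScanB_none (items : List (List Char × Int)) (t : List Char)
    (h : ∀ j, ∀ e ∈ items, pvOk (t.drop j) e = false) :
    pvScanB items t = none := by
  induction t with
  | nil => rfl
  | cons c rest ih =>
    have h0 : ∀ e ∈ items, pvOk (c :: rest) e = false := fun e he => h 0 e he
    simp only [pvScanB]
    have hnone :
        items.find? (pvOk (c :: rest)) = none := by
      rw [List.find?_eq_none]
      intro e he
      simpa [pvOk] using h0 e he
    rw [hnone]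
    exact ih (fun j e he => h (j + 1) e he)

-- B's scan when k is the first matching position
lemma pvScanB_hit (items : List (List Char × Int)) (t : List Char) (k : Nat)
    (hlt : ∀ j < k, ∀ e ∈ items, pvOk (t.drop j) e = false)
    (hex : ∃ e ∈ items, pvOk (t.drop k) e = true) :
    pvScanB items t = (items.find? (pvOk (t.drop k))).map (·.2) := by
  induction k generalizing t with
  | zero =>
    obtain ⟨e, he, hok⟩ := hex
    have hne : t ≠ [] := by
      rcases t with _ | ⟨c, rest⟩
      · simp only [List.drop_nil, pvOk, Bool.and_eq_true, PySem.Chars.startswith_iff,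
          List.prefix_nil] at hok
        simp [hok.2] at hok
      · simp
    rcases t with _ | ⟨c, rest⟩
    · exact absurd rfl hne
    obtain ⟨f, hf⟩ := List.find?_isSome.mpr ⟨e, he, by simpa using hok⟩ |> Option.isSome_iff_exists.mp
    simp only [pvScanB, List.drop_zero] at *
    rw [hf]
    rfl
  | succ k ih =>
    obtain ⟨e, he, hok⟩ := hex
    have hne : t ≠ [] := by
      intro h
      rw [h] at hok
      simp only [List.drop_nil, pvOk, Bool.and_eq_true, PySem.Chars.startswith_iff,
        List.prefix_nil] at hok
      simp [hok.2] at hok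
    rcases t with _ | ⟨c, rest⟩
    · exact absurd rfl hne
    have h0 : items.find? (pvOk (c :: rest)) = none := by
      rw [List.find?_eq_none]
      intro x hx
      simpa using hlt 0 (Nat.succ_pos k) x hx
    simp only [pvScanB, h0, List.drop_succ_cons]
    exact ih rest (fun j hj x hx => by simpa using hlt (j + 1) (by omega) x hx)
      ⟨e, he, by simpa using hok⟩

-- validity of an entry = it matches at some position
lemma pvValid_iff (t : List Char) (e : List Char × Int) :
    (e.1 ≠ [] ∧ PySem.Chars.find t e.1 ≠ -1) ↔ ∃ j, pvOk (t.drop j) e = true := by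
  simp only [pvOk, Bool.and_eq_true, Bool.not_eq_eq_eq_not, Bool.not_true,
    PySem.Chars.startswith_iff, PySem.Chars.find_ne_neg_one_iff, ← PySem.Chars.isIn_iff_infix,
    ← PySem.Chars.exists_prefix_drop_iff_isIn]
  constructor
  · rintro ⟨hne, j, hj⟩; exact ⟨j, by simpa using hne, hj⟩
  · rintro ⟨j, hne, hj⟩; exact ⟨by simpa using hne, j, hj⟩

lemma pvMem_vals (t : List Char) (l : List (List Char × Int)) (e : List Char × Int)
    (he : e ∈ l) (hval : e.1 ≠ [] ∧ PySem.Chars.find t e.1 ≠ -1) :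
    PySem.Chars.find t e.1 ∈ pvVals t l := by
  simp only [pvVals, List.mem_filterMap]
  exact ⟨e, he, by rw [if_pos hval]⟩

lemma pvOk_le (t : List Char) (e : List Char × Int) (j : Nat)
    (h : pvOk (t.drop j) e = true) : PySem.Chars.find t e.1 ≤ (j : Int) := by
  have hval := (pvValid_iff t e).mpr ⟨j, h⟩
  have hp0 : 0 ≤ PySem.Chars.find t e.1 := by
    have := PySem.Chars.neg_one_le_find (s := t) (sub := e.1)
    omega
  have hpre : e.1 <+: t.drop j := by
    have h' : ¬e.1 = [] ∧ e.1 <+: t.drop j := by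
      simpa [pvOk, PySem.Chars.startswith_iff] using h
    exact h'.2
  have hspec := PySem.Chars.find_spec (s := t) (sub := e.1) hp0
  by_contra hgt
  exact hspec.2 j (by omega) hpre

-- the core equivalence, for any text and any item list
lemma pvCore (t : List Char) (items : List (List Char × Int)) :
    pvFoldA t items (none, none) = pvScanB items t := by
  rw [pvFoldA_init]
  cases h : (pvVals t items).min? with
  | none =>
    rw [pvScanB_none]
    intro j e he
    by_contra hok
    have hok : pvOk (t.drop j) e = true := by
      cases hv : pvOk (t.drop j) e
      · exact absurd hv hok
      · rfl
    have hval := (pvValid_iff t e).mpr ⟨j, hok⟩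
    have := pvMem_vals t items e he hval
    rw [List.min?_eq_none_iff.mp h] at this
    exact absurd this (List.not_mem_nil)
  | some m =>
    have hm0 : 0 ≤ m := pvMin?_nonneg t items m h
    obtain ⟨hmem, hle⟩ := List.min?_eq_some_iff.mp h
    obtain ⟨e0, he0, he0c⟩ := List.mem_filterMap.mp (by unfold pvVals at hmem; exact hmem)
    have hval0 : e0.1 ≠ [] ∧ PySem.Chars.find t e0.1 ≠ -1 := by
      by_contra hv
      rw [if_neg hv] at he0c
      cases he0c
    rw [if_pos hval0] at he0c
    have hf0 : PySem.Chars.find t e0.1 = m := Option.some_inj.mp he0c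
    have hspec0 := PySem.Chars.find_spec (s := t) (sub := e0.1) (by omega)
    have hex : ∃ e ∈ items, pvOk (t.drop m.toNat) e = true := by
      refine ⟨e0, he0, ?_⟩
      simp only [pvOk, Bool.and_eq_true, Bool.not_eq_eq_eq_not, Bool.not_true,
        PySem.Chars.startswith_iff]
      refine ⟨by simpa using hval0.1, ?_⟩
      rw [← hf0]
      exact hspec0.1
    have hlt : ∀ j < m.toNat, ∀ e ∈ items, pvOk (t.drop j) e = false := by
      intro j hj e he
      cases hv : pvOk (t.drop j) e
      · rfl
      · exfalso
        have hval := (pvValid_iff t e).mpr ⟨j, hv⟩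
        have hmm := hle _ (pvMem_vals t items e he hval)
        have hjl := pvOk_le t e j hv
        omega
    rw [pvScanB_hit items t m.toNat hlt hex]
    show Option.map (fun x => x.2)
        (items.find? (fun e => (!e.1.isEmpty) && (PySem.Chars.find t e.1 == m))) = _
    refine congrArg (Option.map (fun x : List Char × Int => x.2)) (pvFind?_congr items _ _ ?_)
    intro e he
    cases hEmp : e.1.isEmpty with
    | true => simp [pvOk, hEmp]
    | false =>
      have hne : e.1 ≠ [] := by simpa using hEmp
      simp only [pvOk, hEmp, Bool.not_false, Bool.true_and]
      cases hfm : PySem.Chars.find t e.1 == m with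
      | true =>
        have hfm' : PySem.Chars.find t e.1 = m := by simpa using hfm
        have hspec := PySem.Chars.find_spec (s := t) (sub := e.1) (by omega)
        rw [hfm'] at hspec
        exact ((PySem.Chars.startswith_iff _ _).mpr hspec.1).symm
      | false =>
        have hfm' : PySem.Chars.find t e.1 ≠ m := by simpa using hfm
        cases hsw : PySem.Chars.startswith (t.drop m.toNat) e.1 with
        | false => rfl
        | true =>
          exfalso
          have hok : pvOk (t.drop m.toNat) e = true := by
            simp [pvOk, hEmp, hsw]
          have hval := (pvValid_iff t e).mpr ⟨m.toNat, hok⟩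
          have hmm := hle _ (pvMem_vals t items e he hval)
          have hjl := pvOk_le t e m.toNat hok
          omega

-- ===== VERDICT (by name: the statement is the Claim_ definition above) =====
theorem find_first_label_match_py_spec : Claim_equal_find_first_label_match_py := by
  intro nt lm _
  unfold Spec_find_first_label_match_py find_first_label_match_py find_first_label_match_py_alt
  split
  · rename_i h; rw [h]; rfl
  · exact pvCore _ _
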